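-- pv_equiv track=rewrite | github.com/roymodi/Vscode | stock/dervase_box_(webscrab).py | dayinlist_limit
-- ===== SOURCE A (Python) =====
-- def dayinlist_limit(a,g):# get days in two list uncomon days
--     b=['Friday','Monday','Tuesday','Wednesday','Thursday']
--     l=[]
--     l.clear()
--     for x in b:
--         if x not in a:
--             l.append(x)
--             if x == g:
--                 break
--     return l
-- ===== SOURCE B (Python) =====
-- def dayinlist_limit(a, g):
--     b = ['Friday', 'Monday', 'Tuesday', 'Wednesday', 'Thursday']
--     kept = [x for x in b if x not in a]
--     if g in kept:
--         return kept[:kept.index(g) + 1]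
--     return kept
-- ===== Notes on version B (the rewrite author's own statement) =====
-- stated objective: simpler
-- what changed: Replaces the single loop with append-and-break by a two-phase build-then-truncate: filter the fixed weekday list first, then slice the filtered list up to and including the first occurrence of g.
import Mathlib
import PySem

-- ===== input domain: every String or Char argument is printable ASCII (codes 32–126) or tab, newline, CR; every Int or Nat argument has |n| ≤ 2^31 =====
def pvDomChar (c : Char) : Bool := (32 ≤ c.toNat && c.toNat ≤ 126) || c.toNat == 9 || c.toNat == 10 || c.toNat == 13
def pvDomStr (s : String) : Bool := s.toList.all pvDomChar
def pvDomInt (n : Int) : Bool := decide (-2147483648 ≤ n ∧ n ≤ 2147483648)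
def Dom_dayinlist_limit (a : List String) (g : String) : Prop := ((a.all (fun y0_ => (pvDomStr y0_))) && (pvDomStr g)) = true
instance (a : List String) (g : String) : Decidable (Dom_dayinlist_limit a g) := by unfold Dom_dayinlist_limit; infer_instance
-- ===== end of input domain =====

-- B replaces A's loop-with-break by filter-then-truncate (slice up to the first kept occurrence of g): simpler two-phase decomposition, same values.


-- ===== PORT A =====
-- the loop over b with accumulator l, breaking after appending x when x == g
def dayLoopA : List String → List String → String → List String → List String
  | [], _, _, l => l
  | x :: xs, a, g, l =>
    if a.contains x then dayLoopA xs a g l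
    else
      let l' := l ++ [x]
      if x == g then l' else dayLoopA xs a g l'

def dayinlist_limit (a : List String) (g : String) : List String :=
  dayLoopA ["Friday", "Monday", "Tuesday", "Wednesday", "Thursday"] a g []

-- ===== PORT B =====
def dayinlist_limit_alt (a : List String) (g : String) : List String :=
  let b := ["Friday", "Monday", "Tuesday", "Wednesday", "Thursday"]
  let kept := b.filter (fun x => !a.contains x)
  match PySem.List.index? kept g with
  | some i => PySem.List.slice kept none (some ((i : Int) + 1))
  | none => kept

-- ===== PRECONDITION & SPEC =====
def Spec_dayinlist_limit (a : List String) (g : String) (out : List String) : Prop := out = dayinlist_limit_alt a g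
instance (a : List String) (g : String) (out : List String) : Decidable (Spec_dayinlist_limit a g out) := by unfold Spec_dayinlist_limit; infer_instance

-- ===== CLAIM (what is proved, stated in full; the proofs are below) =====
def Claim_equal_dayinlist_limit : Prop := ∀ (a : List String) (g : String), Dom_dayinlist_limit a g → Spec_dayinlist_limit a g (dayinlist_limit a g)

-- ===== LEMMAS AND PROOFS =====

-- B's truncation on an arbitrary kept list, with slice replaced by take
def truncB (g : String) (ks : List String) : List String :=
  match PySem.List.index? ks g with
  | some i => ks.take (i + 1)
  | none => ks

theorem loopA_eq_truncB (a : List String) (g : String) :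
    ∀ (bs acc : List String), dayLoopA bs a g acc = acc ++ truncB g (bs.filter (fun x => !a.contains x)) := by
  intro bs
  induction bs with
  | nil => intro acc; simp [dayLoopA, truncB, PySem.List.index?]
  | cons x xs ih =>
    intro acc
    by_cases hm : x ∈ a
    · have hf : List.filter (fun x => !a.contains x) (x :: xs)
          = List.filter (fun x => !a.contains x) xs := by simp [hm]
      rw [show dayLoopA (x :: xs) a g acc = dayLoopA xs a g acc from by simp [dayLoopA, hm], hf, ih]
    · have hf : List.filter (fun x => !a.contains x) (x :: xs)
          = x :: List.filter (fun x => !a.contains x) xs := by simp [hm]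
      by_cases hg : x = g
      · subst hg
        rw [show dayLoopA (x :: xs) a x acc = acc ++ [x] from by simp [dayLoopA, hm], hf]
        unfold truncB
        rw [PySem.List.index?_cons_self]
        simp
      · rw [show dayLoopA (x :: xs) a g acc = dayLoopA xs a g (acc ++ [x]) from by
            simp [dayLoopA, hm, hg], ih, hf]
        unfold truncB
        rw [PySem.List.index?_cons_of_ne _ hg]
        cases h : PySem.List.index? (List.filter (fun x => !a.contains x) xs) g with
        | none => simp
        | some i => simp [List.take_succ_cons]

theorem slice_take (ks : List String) (i : ℕ) :
    PySem.List.slice ks none (some ((i : Int) + 1)) = ks.take (i + 1) := by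
  have : ((i : Int) + 1) = ((i + 1 : ℕ) : Int) := by push_cast; ring
  rw [this, PySem.List.slice_to_natCast]

-- ===== VERDICT (by name: the statement is the Claim_ definition above) =====
theorem dayinlist_limit_spec : Claim_equal_dayinlist_limit := by
  intro a g _
  show dayinlist_limit a g = dayinlist_limit_alt a g
  unfold dayinlist_limit dayinlist_limit_alt
  rw [loopA_eq_truncB]
  simp only [List.nil_append]
  unfold truncB
  cases h : PySem.List.index? (["Friday", "Monday", "Tuesday", "Wednesday", "Thursday"].filter (fun x => !a.contains x)) g with
  | none => rfl
  | some i => simp [slice_take]
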